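-- pv_equiv track=rewrite | github.com/luisdorr/luisdorr-Redes-2-trabalho-GA | algorithm.py | _first_hop
-- ===== SOURCE A (Python) =====
-- from typing import Dict, Hashable, Tuple
--
-- def _first_hop(previous: Dict[Hashable, Hashable | None], destination: Hashable) -> Hashable | None:
--     """Return the first hop on the path to ``destination`` if reachable."""
--
--     path: list[Hashable] = []
--     current = destination
--
--     while current is not None:
--         path.append(current)
--         current = previous.get(current)
--
--     if not path:
--         return None
--
--     path.reverse()
--     if len(path) < 2:
--         return None
--
--     return path[1]
-- ===== SOURCE B (Python) =====
-- def _first_hop(previous, destination):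
--     parent = previous.get(destination)
--     if parent is None:
--         return None
--     current = destination
--     while True:
--         grandparent = previous.get(parent)
--         if grandparent is None:
--             return current
--         current, parent = parent, grandparent
-- ===== Notes on version B (the rewrite author's own statement) =====
-- stated objective: simpler
-- what changed: B does a one-step-lookahead walk over the predecessor chain with two node variables (current, parent), returning current as soon as parent has no predecessor, instead of materialising the whole path in a list, reversing it and indexing it.
import Mathlib
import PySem

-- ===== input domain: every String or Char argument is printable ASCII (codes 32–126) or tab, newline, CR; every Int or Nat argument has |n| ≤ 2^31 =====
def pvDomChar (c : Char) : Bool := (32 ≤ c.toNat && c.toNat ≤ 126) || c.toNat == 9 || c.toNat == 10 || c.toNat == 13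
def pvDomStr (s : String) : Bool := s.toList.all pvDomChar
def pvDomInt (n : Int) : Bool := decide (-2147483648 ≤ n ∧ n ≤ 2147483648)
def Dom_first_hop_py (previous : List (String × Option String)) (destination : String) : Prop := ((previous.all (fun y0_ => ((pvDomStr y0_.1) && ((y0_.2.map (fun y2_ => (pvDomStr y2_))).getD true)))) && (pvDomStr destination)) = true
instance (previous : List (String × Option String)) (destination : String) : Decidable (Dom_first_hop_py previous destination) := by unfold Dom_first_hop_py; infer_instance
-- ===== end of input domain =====

-- B replaces A's build-list/reverse/index with a one-step-lookahead walk keeping two node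
-- variables (simpler, O(1) extra space); return values proved equal on every input.  On a
-- cyclic predecessor chain both Pythons diverge identically; the ports run the loops with
-- bounded fuel, exhausted only on those cyclic (diverging) inputs.

-- ===== PORT A =====
-- previous.get(current): first-match association-list lookup, default None
def pvStep (previous : List (String × Option String)) (c : String) : Option String :=
  (PySem.Dict.mk previous).getD c none

-- the while-loop of A: append current, advance via previous.get
def pvBuild (previous : List (String × Option String)) : Nat → Option String → List String → List String
  | 0, _, path => path
  | n+1, cur, path =>
    match cur with
    | none => path
    | some c => pvBuild previous n (pvStep previous c) (path ++ [c])

def first_hop_py (previous : List (String × Option String)) (destination : String) : Option String :=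
  let path := pvBuild previous (previous.length + 1) (some destination) []
  if path = [] then none
  else
    let p := path.reverse
    if p.length < 2 then none
    else PySem.List.pyGet? p 1

-- ===== PORT B =====
-- the while-loop of B: look one step ahead from parent; stop (returning current) when the
-- lookahead is None, otherwise shift both node variables down the chain
def pvWalk (previous : List (String × Option String)) : Nat → String → String → String
  | 0, current, _ => current
  | n+1, current, parent =>
    match pvStep previous parent with
    | none => current
    | some grandparent => pvWalk previous n parent grandparent

def first_hop_py_alt (previous : List (String × Option String)) (destination : String) : Option String :=
  match pvStep previous destination with
  | none => none
  | some parent => some (pvWalk previous (previous.length - 1) destination parent)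

-- ===== PRECONDITION & SPEC =====
def Spec_first_hop_py (previous : List (String × Option String)) (destination : String) (out : Option String) : Prop := out = first_hop_py_alt previous destination
instance (previous : List (String × Option String)) (destination : String) (out : Option String) : Decidable (Spec_first_hop_py previous destination out) := by unfold Spec_first_hop_py; infer_instance

-- ===== CLAIM (what is proved, stated in full; the proofs are below) =====
def Claim_equal_first_hop_py : Prop := ∀ (previous : List (String × Option String)) (destination : String), Dom_first_hop_py previous destination → Spec_first_hop_py previous destination (first_hop_py previous destination)

-- ===== LEMMAS AND PROOFS =====

-- A's loop accumulator factors out: the path built so far is a prefix.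
theorem pvBuild_append (previous : List (String × Option String)) :
    ∀ (n : Nat) (cur : Option String) (path : List String),
      pvBuild previous n cur path = path ++ pvBuild previous n cur [] := by
  intro n
  induction n with
  | zero => intro cur path; simp [pvBuild]
  | succ n ih =>
    intro cur path
    cases cur with
    | none => simp [pvBuild]
    | some c =>
      simp only [pvBuild, List.nil_append]
      rw [ih (pvStep previous c) (path ++ [c]), ih (pvStep previous c) [c]]
      simp

theorem pvBuild_none (previous : List (String × Option String)) (n : Nat) (path : List String) :
    pvBuild previous n none path = path := by
  cases n <;> simp [pvBuild]

-- the second-to-last element of a cons-cons list ignores the head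
theorem penult_cons (x a b : String) (l : List String) :
    (x :: a :: b :: l).reverse[1]? = (a :: b :: l).reverse[1]? := by
  have h : (x :: a :: b :: l).reverse = (a :: b :: l).reverse ++ [x] := by simp
  rw [h, List.getElem?_append_left (by simp)]

-- B's walk computes the second-to-last element of current :: parent :: (A's chain from parent)
theorem pvWalk_spec (previous : List (String × Option String)) :
    ∀ (n : Nat) (current parent : String),
      some (pvWalk previous n current parent) =
        (current :: parent :: pvBuild previous n (pvStep previous parent) []).reverse[1]? := by
  intro n
  induction n with
  | zero =>
    intro current parent
    simp [pvWalk, pvBuild]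
  | succ n ih =>
    intro current parent
    cases h : pvStep previous parent with
    | none => simp [pvWalk, h, pvBuild_none]
    | some g =>
      simp only [pvWalk, h]
      rw [ih parent g]
      simp only [pvBuild, List.nil_append]
      rw [pvBuild_append previous n (pvStep previous g) [g]]
      exact (penult_cons current parent g _).symm

-- pyGet? at index 1 of a list of length ≥ 2 is plain getElem?
theorem pyGet?_one (l : List String) (h : 2 ≤ l.length) :
    PySem.List.pyGet? l 1 = l[1]? := by
  simp only [PySem.List.pyGet?, PySem.List.pyIdx?]
  norm_num
  rw [if_pos (by exact_mod_cast Nat.lt_of_lt_of_le (by norm_num) h)]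
  simp [List.getElem?_eq_getElem (by omega : 1 < l.length)]

-- the empty dict looks up to none
theorem pvStep_nil (c : String) : pvStep [] c = none := by
  simp [pvStep, PySem.Dict.getD, PySem.Dict.get?]

theorem first_hop_py_eq_alt (previous : List (String × Option String)) (destination : String) :
    first_hop_py previous destination = first_hop_py_alt previous destination := by
  unfold first_hop_py first_hop_py_alt
  simp only [pvBuild, List.nil_append]
  rw [pvBuild_append previous previous.length (pvStep previous destination) [destination]]
  cases h : pvStep previous destination with
  | none => simp [pvBuild_none]
  | some parent =>
    have hne : previous ≠ [] := by rintro rfl; rw [pvStep_nil] at h; exact absurd h (by simp)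
    have hL : previous.length = (previous.length - 1) + 1 := by
      have := List.length_pos_iff.mpr hne; omega
    conv_lhs => rw [hL]
    simp only [pvBuild, List.nil_append]
    rw [pvBuild_append previous (previous.length - 1) (pvStep previous parent) [parent]]
    rw [if_neg (by simp), if_neg (by simp)]
    rw [pyGet?_one _ (by simp)]
    exact (pvWalk_spec previous (previous.length - 1) destination parent).symm

-- ===== VERDICT (by name: the statement is the Claim_ definition above) =====
theorem first_hop_py_spec : Claim_equal_first_hop_py := by
  intro previous destination _
  unfold Spec_first_hop_py
  exact first_hop_py_eq_alt previous destination
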